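-- pv_equiv track=rewrite | github.com/1pjmcdonough/python_work | python_projects/roman.py | validSequences
-- ===== SOURCE A (Python) =====
-- def validSequences(string):
--     '''
--     This function handles rule 7 of valid roman numerals. It takes in a
--     string as a parameter,checks if there are any sequential numerals of 2 or 3,
--     and returns true if they are powers of 10 or false otherwise.
--     '''
--     charsList = [char for char in string]
--     for char in charsList:
--         if charsList.count(char) == 2 or charsList.count(char) == 3:
--             if (char == 'V' or char == 'L'
--             or char == 'D'):
--                 return False
--             else:
--                 continue
--     return True
-- ===== SOURCE B (Python) =====
-- def validSequences(string):
--     charsList = list(string)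
--     for target in ('V', 'L', 'D'):
--         if charsList.count(target) in (2, 3):
--             return False
--     return True
-- ===== Notes on version B (the rewrite author's own statement) =====
-- stated objective: faster
-- what changed: Instead of scanning every input character and counting it, B counts only the three characters of interest ('V','L','D') once each and returns False on the first with count 2 or 3.
import Mathlib
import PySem

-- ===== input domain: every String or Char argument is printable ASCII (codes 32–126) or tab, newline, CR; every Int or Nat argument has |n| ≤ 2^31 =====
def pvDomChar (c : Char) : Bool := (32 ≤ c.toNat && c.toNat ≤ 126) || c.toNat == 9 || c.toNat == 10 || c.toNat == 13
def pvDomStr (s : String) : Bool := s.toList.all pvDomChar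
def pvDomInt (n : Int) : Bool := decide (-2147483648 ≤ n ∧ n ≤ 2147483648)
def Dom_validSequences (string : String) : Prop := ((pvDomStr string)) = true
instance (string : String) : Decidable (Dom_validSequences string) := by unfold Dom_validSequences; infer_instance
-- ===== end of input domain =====

-- B counts only 'V',''L','D' once each instead of counting every character of the input: O(n) vs A's O(n^2).

-- ===== PORT A =====
-- A's loop over charsList; `all` is the full charsList, `l` the remaining suffix.
def goA (all : List Char) : List Char → Bool
  | [] => true
  | c :: rest =>
      if all.count c = 2 ∨ all.count c = 3 then
        if c = 'V' ∨ c = 'L' ∨ c = 'D' then false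
        else goA all rest
      else goA all rest

def validSequences (string : String) : Bool := goA string.toList string.toList

-- ===== PORT B =====
-- B's loop over the fixed tuple ('V','L','D').
def goB (charsList : List Char) : List Char → Bool
  | [] => true
  | t :: rest =>
      if charsList.count t = 2 ∨ charsList.count t = 3 then false
      else goB charsList rest

def validSequences_alt (string : String) : Bool := goB string.toList ['V', 'L', 'D']

-- ===== PRECONDITION & SPEC =====
def Spec_validSequences (string : String) (out : Bool) : Prop := out = validSequences_alt string
instance (string : String) (out : Bool) : Decidable (Spec_validSequences string out) := by unfold Spec_validSequences; infer_instance

-- ===== CLAIM (what is proved, stated in full; the proofs are below) =====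
def Claim_equal_validSequences : Prop := ∀ (string : String), Dom_validSequences string → Spec_validSequences string (validSequences string)

-- ===== LEMMAS AND PROOFS =====

lemma goA_eq_any (all l : List Char) :
    goA all l = !(l.any (fun c =>
      decide (all.count c = 2 ∨ all.count c = 3) &&
      decide (c = 'V' ∨ c = 'L' ∨ c = 'D'))) := by
  induction l with
  | nil => simp [goA]
  | cons c rest ih =>
      simp only [goA, List.any_cons]
      split_ifs with h1 h2
      · simp [h1, h2]
      · simp [h1, h2, ih]
      · simp [h1, ih]

lemma goB_eq_any (all ts : List Char) :
    goB all ts = !(ts.any (fun t => decide (all.count t = 2 ∨ all.count t = 3))) := by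
  induction ts with
  | nil => simp [goB]
  | cons t rest ih =>
      simp only [goB, List.any_cons]
      split_ifs with h1
      · simp [h1]
      · simp [h1, ih]

lemma any_agree (all : List Char) :
    (all.any (fun c =>
      decide (all.count c = 2 ∨ all.count c = 3) &&
      decide (c = 'V' ∨ c = 'L' ∨ c = 'D'))) =
    (['V','L','D'].any (fun t => decide (all.count t = 2 ∨ all.count t = 3))) := by
  rw [Bool.eq_iff_iff]
  simp only [List.any_eq_true, Bool.and_eq_true, decide_eq_true_eq]
  constructor
  · rintro ⟨c, _, hc, hv⟩
    exact ⟨c, by rcases hv with h|h|h <;> simp [h], hc⟩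
  · rintro ⟨t, ht, hc⟩
    refine ⟨t, ?_, hc, ?_⟩
    · have : 0 < all.count t := by omega
      exact List.count_pos_iff.mp this
    · simpa using ht

-- ===== VERDICT (by name: the statement is the Claim_ definition above) =====
theorem validSequences_spec : Claim_equal_validSequences := by
  intro s _
  unfold Spec_validSequences validSequences validSequences_alt
  rw [goA_eq_any, goB_eq_any, any_agree]
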